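-- pv_equiv track=rewrite | github.com/samarpro/villani-code | villani_code/state_tooling.py | _parse_benchmark_denial_message
-- ===== SOURCE A (Python) =====
-- def _parse_benchmark_denial_message(message: str) -> tuple[str, str | None]:
--     reason = "policy_denied"
--     path: str | None = None
--     for part in message.split():
--         if part.startswith("reason="):
--             reason = part.split("=", 1)[1]
--         if part.startswith("path="):
--             path = part.split("=", 1)[1]
--     return reason, path
-- ===== SOURCE B (Python) =====
-- def _parse_benchmark_denial_message(message: str) -> tuple[str, str | None]:
--     fields: dict[str, str] = {}
--     for token in message.split():
--         if "=" in token: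
--             key, value = token.split("=", 1)
--             fields[key] = value
--     return fields.get("reason", "policy_denied"), fields.get("path")
-- ===== Notes on version B (the rewrite author's own statement) =====
-- stated objective: alternative
-- what changed: Instead of checking the two literal prefixes inline and updating two variables, B builds a general key=value table in one pass (later tokens overwrite earlier) and then reads the two fields out of it.
import Mathlib
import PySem

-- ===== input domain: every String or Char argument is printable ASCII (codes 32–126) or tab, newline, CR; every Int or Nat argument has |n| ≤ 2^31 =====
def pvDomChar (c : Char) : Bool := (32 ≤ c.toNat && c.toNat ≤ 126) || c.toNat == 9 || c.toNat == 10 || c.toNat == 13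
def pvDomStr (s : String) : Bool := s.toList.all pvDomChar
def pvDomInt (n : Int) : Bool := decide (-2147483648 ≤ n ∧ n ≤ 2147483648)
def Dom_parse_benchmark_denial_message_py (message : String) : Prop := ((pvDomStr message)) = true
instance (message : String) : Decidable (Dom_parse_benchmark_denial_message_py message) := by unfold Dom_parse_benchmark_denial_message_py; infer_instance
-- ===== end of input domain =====

-- ===== PORT A =====
-- B replaces the inline two-prefix checks by a generic key=value table built in one pass, then two lookups (alternative decomposition, same cost).

-- part.split("=", 1)[1]; the index [1] is only evaluated on parts containing '=', where it is in range
def pvField (part : String) : String :=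
  PySem.List.pyGetD ((PySem.Str.splitMax? part "=" 1).getD []) 1 ""

def pvAstep (st : String × Option String) (part : String) : String × Option String :=
  let st1 := if PySem.Str.startswith part "reason=" then (pvField part, st.2) else st
  if PySem.Str.startswith part "path=" then (st1.1, some (pvField part)) else st1

def parse_benchmark_denial_message_py (message : String) : String × Option String :=
  (PySem.Str.split₀ message).foldl pvAstep ("policy_denied", none)

-- ===== PORT B =====
-- 'key, value = token.split("=", 1)': exactly two pieces whenever '=' is in token, so the wildcard arm is unreachable
def pvBstep (d : PySem.Dict String String) (token : String) : PySem.Dict String String :=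
  if PySem.Str.isIn "=" token then
    match PySem.Str.splitMax? token "=" 1 with
    | some [key, value] => d.insert key value
    | _ => d
  else d

def parse_benchmark_denial_message_py_alt (message : String) : String × Option String :=
  let fields := (PySem.Str.split₀ message).foldl pvBstep PySem.Dict.empty
  (fields.getD "reason" "policy_denied", fields.get? "path")

-- ===== PRECONDITION & SPEC =====
def Spec_parse_benchmark_denial_message_py (message : String) (out : String × Option String) : Prop := out = parse_benchmark_denial_message_py_alt message
instance (message : String) (out : String × Option String) : Decidable (Spec_parse_benchmark_denial_message_py message out) := by unfold Spec_parse_benchmark_denial_message_py; infer_instance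

-- ===== CLAIM (what is proved, stated in full; the proofs are below) =====
def Claim_equal_parse_benchmark_denial_message_py : Prop := ∀ (message : String), Dom_parse_benchmark_denial_message_py message → Spec_parse_benchmark_denial_message_py message (parse_benchmark_denial_message_py message)

-- ===== LEMMAS AND PROOFS =====

-- splitOnMax.go with maxsplit budget 0 copies the rest into the current piece
lemma pv_go_zero (fuel : Nat) (l cur : List Char) (acc : List (List Char)) :
    PySem.Chars.splitOnMax.go ['='] fuel 0 l cur acc = ((cur.reverse ++ l) :: acc).reverse := by
  cases fuel <;> cases l <;> simp [PySem.Chars.splitOnMax.go]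

-- splitOnMax.go with budget 1 on a list containing '=' splits at the first '='
lemma pv_go_mem : ∀ (l : List Char), '=' ∈ l → ∀ (fuel : Nat), l.length < fuel →
    ∀ (cur : List Char) (acc : List (List Char)),
    PySem.Chars.splitOnMax.go ['='] fuel 1 l cur acc
      = acc.reverse ++ [cur.reverse ++ l.takeWhile (· != '='), (l.dropWhile (· != '=')).tail] := by
  intro l
  induction l with
  | nil => intro h; simp at h
  | cons c rest ih =>
    intro hmem fuel hfuel cur acc
    cases fuel with
    | zero => omega
    | succ f =>
      by_cases hc : c = '='
      · subst hc
        simp [PySem.Chars.splitOnMax.go, List.isPrefixOf, pv_go_zero]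
      · have hmem' : '=' ∈ rest := by
          rcases List.mem_cons.mp hmem with h | h
          · exact absurd h.symm hc
          · exact h
        have hstep : PySem.Chars.splitOnMax.go ['='] (f + 1) 1 (c :: rest) cur acc
            = PySem.Chars.splitOnMax.go ['='] f 1 rest (c :: cur) acc := by
          simp [PySem.Chars.splitOnMax.go, List.isPrefixOf, Ne.symm hc]
        rw [hstep, ih hmem' f (by simpa using hfuel) (c :: cur) acc]
        simp [hc]

-- s.split("=", 1) when '=' occurs: the piece before the first '=' and the rest
lemma pv_splitMax_mem (t : List Char) (h : '=' ∈ t) :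
    PySem.Chars.splitMax? t ['='] 1
      = some [t.takeWhile (· != '='), (t.dropWhile (· != '=')).tail] := by
  simp [PySem.Chars.splitMax?, PySem.Chars.splitOnMax,
        pv_go_mem t h (t.length + 1) (by omega) [] []]

-- all of a key without '=' survives takeWhile up to the first '='
lemma pv_takeWhile_key (ks rest : List Char) (hk : '=' ∉ ks) :
    List.takeWhile (· != '=') (ks ++ '=' :: rest) = ks := by
  induction ks with
  | nil => simp
  | cons c cs ih =>
    have hc : c ≠ '=' := fun h => hk (by simp [h])
    have hcs : '=' ∉ cs := fun h => hk (by simp [h])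
    simp [hc, ih hcs]

-- 'ks=' is a prefix of t  iff  the part of t before its first '=' is exactly ks
lemma pv_prefix_iff (t ks : List Char) (hk : '=' ∉ ks) (ht : '=' ∈ t) :
    (ks ++ ['=']) <+: t ↔ t.takeWhile (· != '=') = ks := by
  constructor
  · rintro ⟨rest, hrest⟩
    rw [← hrest, List.append_assoc]
    exact pv_takeWhile_key ks rest hk
  · intro htw
    have hdw : t.dropWhile (· != '=') ≠ [] := by
      intro hnil
      have h2 := List.takeWhile_append_dropWhile (p := (· != '=')) (l := t)
      rw [hnil, List.append_nil, htw] at h2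
      rw [← h2] at ht
      exact hk ht
    obtain ⟨c, cs, hcons⟩ := List.exists_cons_of_ne_nil hdw
    have hc : c = '=' := by
      have h3 := List.head_dropWhile_not (· != '=') hdw
      have h4 : (t.dropWhile (· != '=')).head? = some c := by rw [hcons]; rfl
      rw [List.head?_eq_some_head hdw] at h4
      rw [Option.some.inj h4] at h3
      simpa using h3
    refine ⟨cs, ?_⟩
    conv_rhs => rw [← List.takeWhile_append_dropWhile (p := (· != '=')) (l := t)]
    rw [htw, hcons, hc]
    simp

lemma pv_isIn_eq (t : String) : PySem.Str.isIn "=" t = true ↔ '=' ∈ t.toList := by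
  rw [PySem.Str.isIn_eq]
  show PySem.Chars.isIn ['='] t.toList = true ↔ _
  rw [PySem.Chars.isIn_iff_infix]
  constructor
  · intro h
    exact h.sublist.subset (by simp)
  · intro h
    obtain ⟨s, u, hsu⟩ := List.append_of_mem h
    exact ⟨s, u, by simp [hsu]⟩

lemma pv_ofList_eq_iff (kc : List Char) (s : String) : String.ofList kc = s ↔ kc = s.toList := by
  constructor
  · intro h; rw [← h, String.toList_ofList]
  · intro h; rw [h]; simp

lemma pv_startswith_iff (t : String) (ks : List Char) (hk : '=' ∉ ks) (ht : '=' ∈ t.toList)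
    (key : String) (hkey : key.toList = ks ++ ['=']) :
    PySem.Str.startswith t key = true ↔ t.toList.takeWhile (· != '=') = ks := by
  rw [PySem.Str.startswith_eq, PySem.Chars.startswith_iff, hkey]
  exact pv_prefix_iff t.toList ks hk ht

-- one token: reading the two fields out of B's updated table is A's update of the two variables
lemma pv_step (d : PySem.Dict String String) (t : String) :
    ((pvBstep d t).getD "reason" "policy_denied", (pvBstep d t).get? "path")
      = pvAstep (d.getD "reason" "policy_denied", d.get? "path") t := by
  have e1 : ("reason=" : String).toList = ['r','e','a','s','o','n','='] := rfl
  have e2 : ("path=" : String).toList = ['p','a','t','h','='] := rfl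
  by_cases hm : '=' ∈ t.toList
  · have hin : PySem.Str.isIn "=" t = true := (pv_isIn_eq t).mpr hm
    have hsplit : PySem.Str.splitMax? t "=" 1
        = some [String.ofList (t.toList.takeWhile (· != '=')),
                String.ofList ((t.toList.dropWhile (· != '=')).tail)] := by
      have h1 : ("=" : String).toList = ['='] := rfl
      simp [PySem.Str.splitMax?, h1, pv_splitMax_mem t.toList hm]
    have hfield : pvField t = String.ofList ((t.toList.dropWhile (· != '=')).tail) := by
      simp [pvField, hsplit, pysem]
    have hrs : PySem.Str.startswith t "reason=" = true
        ↔ t.toList.takeWhile (· != '=') = "reason".toList :=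
      pv_startswith_iff t "reason".toList (by decide) hm "reason=" (by decide)
    have hps : PySem.Str.startswith t "path=" = true
        ↔ t.toList.takeWhile (· != '=') = "path".toList :=
      pv_startswith_iff t "path".toList (by decide) hm "path=" (by decide)
    unfold pvBstep pvAstep
    rw [hin, if_pos rfl, hsplit, hfield]
    by_cases hr : t.toList.takeWhile (· != '=') = "reason".toList
    · have hk : String.ofList (t.toList.takeWhile (· != '=')) = "reason" :=
        (pv_ofList_eq_iff _ _).mpr hr
      have hbr : PySem.Str.startswith t "reason=" = true := hrs.mpr hr
      have hbp : PySem.Str.startswith t "path=" = false := by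
        rw [Bool.eq_false_iff]
        intro h
        exact absurd (hps.mp h) (by rw [hr]; decide)
      rw [hk]
      rw [PySem.Str.startswith_eq, e1] at hbr
      rw [PySem.Str.startswith_eq, e2] at hbp
      simp [hbr, hbp,
            PySem.Dict.get?_insert_of_ne d _ (by decide : ("path" : String) ≠ "reason")]
    · by_cases hp : t.toList.takeWhile (· != '=') = "path".toList
      · have hk : String.ofList (t.toList.takeWhile (· != '=')) = "path" :=
          (pv_ofList_eq_iff _ _).mpr hp
        have hbp : PySem.Str.startswith t "path=" = true := hps.mpr hp
        have hbr : PySem.Str.startswith t "reason=" = false := by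
          rw [Bool.eq_false_iff]
          intro h
          exact hr (hrs.mp h)
        rw [hk]
        rw [PySem.Str.startswith_eq, e1] at hbr
        rw [PySem.Str.startswith_eq, e2] at hbp
        simp [hbr, hbp, PySem.Dict.get?_insert_self, PySem.Dict.getD_insert,
              (by decide : ¬ ("reason" : String) = "path")]
      · have hkr : ¬ ("reason" : String) = String.ofList (t.toList.takeWhile (· != '=')) :=
          fun h => hr ((pv_ofList_eq_iff _ _).mp h.symm)
        have hkp : ("path" : String) ≠ String.ofList (t.toList.takeWhile (· != '=')) :=
          fun h => hp ((pv_ofList_eq_iff _ _).mp h.symm)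
        have hbr : PySem.Str.startswith t "reason=" = false := by
          rw [Bool.eq_false_iff]; intro h; exact hr (hrs.mp h)
        have hbp : PySem.Str.startswith t "path=" = false := by
          rw [Bool.eq_false_iff]; intro h; exact hp (hps.mp h)
        rw [PySem.Str.startswith_eq, e1] at hbr
        rw [PySem.Str.startswith_eq, e2] at hbp
        simp [hbr, hbp, PySem.Dict.getD_insert, hkr,
              PySem.Dict.get?_insert_of_ne d _ hkp]
  · have hin : PySem.Str.isIn "=" t = false := by
      cases h : PySem.Str.isIn "=" t
      · rfl
      · exact absurd ((pv_isIn_eq t).mp h) hm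
    have hbr : PySem.Str.startswith t "reason=" = false := by
      rw [Bool.eq_false_iff]
      intro h
      rw [PySem.Str.startswith_eq, PySem.Chars.startswith_iff] at h
      exact hm (h.sublist.subset (by decide))
    have hbp : PySem.Str.startswith t "path=" = false := by
      rw [Bool.eq_false_iff]
      intro h
      rw [PySem.Str.startswith_eq, PySem.Chars.startswith_iff] at h
      exact hm (h.sublist.subset (by decide))
    rw [PySem.Str.startswith_eq, e1] at hbr
    rw [PySem.Str.startswith_eq, e2] at hbp
    rw [PySem.Str.isIn_eq] at hin
    have hin' : PySem.Chars.isIn ['='] t.toList = false := hin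
    unfold pvBstep pvAstep
    simp [hin', hbr, hbp]

-- the whole loop, by induction on the token list, generalizing the table
lemma pv_loop : ∀ (ts : List String) (d : PySem.Dict String String),
    ((ts.foldl pvBstep d).getD "reason" "policy_denied", (ts.foldl pvBstep d).get? "path")
      = ts.foldl pvAstep (d.getD "reason" "policy_denied", d.get? "path") := by
  intro ts
  induction ts with
  | nil => intro d; rfl
  | cons t ts ih => intro d; rw [List.foldl_cons, List.foldl_cons, ← pv_step, ih]

-- ===== VERDICT (by name: the statement is the Claim_ definition above) =====
theorem parse_benchmark_denial_message_py_spec : Claim_equal_parse_benchmark_denial_message_py := by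
  intro message _
  unfold Spec_parse_benchmark_denial_message_py
  show parse_benchmark_denial_message_py message
      = ((((PySem.Str.split₀ message).foldl pvBstep PySem.Dict.empty).getD "reason" "policy_denied"),
         (((PySem.Str.split₀ message).foldl pvBstep PySem.Dict.empty).get? "path"))
  rw [pv_loop]
  rfl
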